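-- pv_equiv track=rewrite | github.com/LiuJiajun100938083/School-AI-Assistant-Demo | app/domains/vision/json_utils.py | extract_json_from_thinking
-- ===== SOURCE A (Python) =====
-- def extract_json_from_thinking(text: str) -> str:
--     """
--     從 thinking 模式的混合文本中智能提取 JSON 塊。
--
--     策略：找到所有 '{' 位置，從每個位置做括號匹配，
--     嘗試解析為 JSON，返回第一個含 'question' 或 'answer' 鍵的有效 JSON 字符串。
--     """
--     # 先嘗試 ```json ... ``` 塊
--     if "```json" in text:
--         block = text.split("```json")[1].split("```")[0].strip()
--         if block:
--             return block
--     if "```" in text: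
--         parts = text.split("```")
--         if len(parts) >= 3:
--             block = parts[1].strip()
--             if block.startswith("{"):
--                 return block
--
--     # 從每個 '{' 位置做括號匹配
--     candidates = []
--     i = 0
--     while i < len(text):
--         if text[i] == '{':
--             depth = 0
--             in_str = False
--             esc = False
--             for j in range(i, len(text)):
--                 ch = text[j]
--                 if esc:
--                     esc = False
--                     continue
--                 if ch == '\\' and in_str:
--                     esc = True
--                     continue
--                 if ch == '"' and not esc:
--                     in_str = not in_str
--                     continue
--                 if in_str:
--                     continue
--                 if ch == '{':
--                     depth += 1
--                 elif ch == '}':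
--                     depth -= 1
--                     if depth == 0:
--                         candidate = text[i:j + 1]
--                         if ('"question"' in candidate or '"answer"' in candidate):
--                             candidates.append(candidate)
--                         break
--         i += 1
--
--     if candidates:
--         candidates.sort(key=len, reverse=True)
--         return candidates[0]
--
--     # 回退：嘗試找到任何足夠大的 {...} 塊
--     all_candidates = []
--     i = 0
--     while i < len(text):
--         if text[i] == '{':
--             depth = 0
--             in_str = False
--             esc = False
--             for j in range(i, len(text)):
--                 ch = text[j]
--                 if esc:
--                     esc = False
--                     continue
--                 if ch == '\\' and in_str:
--                     esc = True
--                     continue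
--                 if ch == '"' and not esc:
--                     in_str = not in_str
--                     continue
--                 if in_str:
--                     continue
--                 if ch == '{':
--                     depth += 1
--                 elif ch == '}':
--                     depth -= 1
--                     if depth == 0:
--                         candidate = text[i:j + 1]
--                         if len(candidate) > 100:
--                             all_candidates.append(candidate)
--                         break
--         i += 1
--
--     if all_candidates:
--         all_candidates.sort(key=len, reverse=True)
--         return all_candidates[0]
--
--     # 最終回退：傳統 find/rfind
--     start = text.find("{")
--     end = text.rfind("}")
--     if start != -1 and end != -1 and end > start:
--         return text[start:end + 1]
--
--     return text
-- ===== SOURCE B (Python) =====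
-- def extract_json_from_thinking(text: str) -> str:
--     # Memoized right-to-left brace matching: each '{' is resolved in one pass
--     # that jumps over already-matched inner spans, instead of a fresh O(n) scan per '{'.
--     if "```json" in text:
--         block = text.split("```json")[1].split("```")[0].strip()
--         if block:
--             return block
--     if "```" in text:
--         parts = text.split("```")
--         if len(parts) >= 3:
--             block = parts[1].strip()
--             if block.startswith("{"):
--                 return block
--
--     n = len(text)
--     ends = {}
--     for i in range(n - 1, -1, -1):
--         if text[i] != '{':
--             continue
--         j = i + 1
--         in_str = False
--         esc = False
--         while j < n:
--             ch = text[j]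
--             if esc:
--                 esc = False
--             elif ch == '\\' and in_str:
--                 esc = True
--             elif ch == '"':
--                 in_str = not in_str
--             elif in_str:
--                 pass
--             elif ch == '{':
--                 k = ends.get(j)
--                 if k is None:
--                     break
--                 j = k
--             elif ch == '}':
--                 ends[i] = j
--                 break
--             j += 1
--
--     spans = [(i, ends[i]) for i in sorted(ends)]
--
--     candidates = [text[i:e + 1] for i, e in spans
--                   if '"question"' in text[i:e + 1] or '"answer"' in text[i:e + 1]]
--     if candidates:
--         candidates.sort(key=len, reverse=True)
--         return candidates[0]
--
--     all_candidates = [text[i:e + 1] for i, e in spans if e - i + 1 > 100]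
--     if all_candidates:
--         all_candidates.sort(key=len, reverse=True)
--         return all_candidates[0]
--
--     start = text.find("{")
--     end = text.rfind("}")
--     if start != -1 and end != -1 and end > start:
--         return text[start:end + 1]
--     return text
-- ===== Notes on version B (the rewrite author's own statement) =====
-- stated objective: faster
-- what changed: A restarts a fresh depth/in-string state machine at every opening brace (quadratic on brace-heavy or unbalanced text); B makes one right-to-left pass that memoizes each opening brace's matching close position, resolving each scan by jumping over already-matched inner spans, then builds both candidate lists from the memo.
import Mathlib
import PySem

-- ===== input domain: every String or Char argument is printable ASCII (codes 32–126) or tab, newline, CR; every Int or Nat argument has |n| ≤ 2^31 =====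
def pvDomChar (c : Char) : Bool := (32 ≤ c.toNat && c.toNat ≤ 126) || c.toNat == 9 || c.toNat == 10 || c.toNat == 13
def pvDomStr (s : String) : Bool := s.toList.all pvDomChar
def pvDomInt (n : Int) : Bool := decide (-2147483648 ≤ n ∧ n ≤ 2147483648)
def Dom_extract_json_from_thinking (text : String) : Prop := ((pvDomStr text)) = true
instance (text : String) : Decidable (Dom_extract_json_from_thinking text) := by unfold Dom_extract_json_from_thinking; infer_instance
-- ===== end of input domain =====

-- B replaces A's fresh O(n) brace-matching scan per '{' by one memoized right-to-left
-- pass that jumps over already-matched inner spans (objective: faster on brace-heavy text).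

-- ===== PORT A =====
-- A's ```json / ``` fenced-block preamble (early returns encoded as Option)
def aPre1 (t : List Char) : Option String :=
  if PySem.Chars.isIn "```json".toList t then
    (let block := PySem.Chars.strip
        ((PySem.Chars.splitOn ((PySem.Chars.splitOn t "```json".toList).getD 1 []) "```".toList).getD 0 [])
     if block ≠ [] then some (String.ofList block) else none)
  else none

def aPre2 (t : List Char) : Option String :=
  if PySem.Chars.isIn "```".toList t then
    (let parts := PySem.Chars.splitOn t "```".toList
     if parts.length ≥ 3 then
       (let block := PySem.Chars.strip (parts.getD 1 [])
        if PySem.Chars.startswith block ['{'] then some (String.ofList block) else none)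
     else none)
  else none

-- A's inner loop: scan from one position with depth / in-string / escape state;
-- returns the relative index of the '}' that brings depth to 0 (the `break`), none if the loop ends.
def aScan : List Char → Int → Bool → Bool → Option Nat
  | [], _, _, _ => none
  | ch :: rest, depth, instr, esc =>
    if esc = true then (aScan rest depth instr false).map (· + 1)
    else if ch = '\\' ∧ instr = true then (aScan rest depth instr true).map (· + 1)
    else if ch = '"' ∧ esc = false then (aScan rest depth (!instr) esc).map (· + 1)
    else if instr = true then (aScan rest depth instr esc).map (· + 1)
    else if ch = '{' then (aScan rest (depth + 1) instr esc).map (· + 1)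
    else if ch = '}' then
      if depth - 1 = 0 then some 0
      else (aScan rest (depth - 1) instr esc).map (· + 1)
    else (aScan rest depth instr esc).map (· + 1)

-- A's outer `while i < len(text)` loop: at each '{' run the scan, slice the candidate, filter.
def aCollect (pred : List Char → Bool) : List Char → List (List Char)
  | [] => []
  | c :: rest =>
    (match (if c = '{' then aScan (c :: rest) 0 false false else none) with
     | some m =>
        let cand := (c :: rest).take (m + 1)
        if pred cand then [cand] else []
     | none => []) ++ aCollect pred rest

def aMain (t : List Char) : String :=
  let candidates := aCollect
      (fun c => PySem.Chars.isIn "\"question\"".toList c || PySem.Chars.isIn "\"answer\"".toList c) t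
  if candidates ≠ [] then
    String.ofList ((PySem.List.sorted candidates (fun c => (c.length : Int)) true).headD [])
  else
    let allc := aCollect (fun c => decide (100 < c.length)) t
    if allc ≠ [] then
      String.ofList ((PySem.List.sorted allc (fun c => (c.length : Int)) true).headD [])
    else
      let start := PySem.Chars.find t ['{']
      let en := PySem.Chars.rfind t ['}']
      if start ≠ -1 ∧ en ≠ -1 ∧ en > start then
        String.ofList (PySem.List.slice t (some start) (some (en + 1)))
      else String.ofList t

def extract_json_from_thinking (text : String) : String :=
  match aPre1 text.toList with
  | some s => s
  | none =>
    match aPre2 text.toList with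
    | some s => s
    | none => aMain text.toList

-- ===== PORT B =====
-- B's ```json / ``` fenced-block preamble (early returns encoded as Option)
def bPre1 (t : List Char) : Option String :=
  if PySem.Chars.isIn "```json".toList t then
    (let block := PySem.Chars.strip
        ((PySem.Chars.splitOn ((PySem.Chars.splitOn t "```json".toList).getD 1 []) "```".toList).getD 0 [])
     if block ≠ [] then some (String.ofList block) else none)
  else none

def bPre2 (t : List Char) : Option String :=
  if PySem.Chars.isIn "```".toList t then
    (let parts := PySem.Chars.splitOn t "```".toList
     if parts.length ≥ 3 then
       (let block := PySem.Chars.strip (parts.getD 1 [])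
        if PySem.Chars.startswith block ['{'] then some (String.ofList block) else none)
     else none)
  else none

-- B's inner `while j < n` loop: no depth counter; jumps over memoized inner spans,
-- returns the absolute index of the first out-of-string '}' (none if unmatched).
def bLoop (t : List Char) (n : Nat) (ends : PySem.Dict Nat Nat) :
    Nat → Nat → Bool → Bool → Option Nat
  | 0, _, _, _ => none
  | fuel + 1, j, instr, esc =>
    if j < n then
      if esc = true then bLoop t n ends fuel (j + 1) instr false
      else if t.getD j ' ' = '\\' ∧ instr = true then bLoop t n ends fuel (j + 1) instr true
      else if t.getD j ' ' = '"' then bLoop t n ends fuel (j + 1) (!instr) esc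
      else if instr = true then bLoop t n ends fuel (j + 1) instr esc
      else if t.getD j ' ' = '{' then
        match ends.get? j with
        | none => none
        | some k => bLoop t n ends fuel (k + 1) instr esc
      else if t.getD j ' ' = '}' then some j
      else bLoop t n ends fuel (j + 1) instr esc
    else none

-- B's `for i in range(n-1, -1, -1)` loop building the memo dict (i+1 ↦ process index i, then recurse).
def bBuild (t : List Char) (n : Nat) : Nat → PySem.Dict Nat Nat → PySem.Dict Nat Nat
  | 0, d => d
  | i + 1, d =>
    bBuild t n i
      (if t.getD i ' ' = '{' then
         match bLoop t n d (n + 1) (i + 1) false false with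
         | some e => d.insert i e
         | none => d
       else d)

def bMain (t : List Char) : String :=
  let n := t.length
  let ends := bBuild t n n PySem.Dict.empty
  let spans := (PySem.List.sorted ends.keys (fun k => k) false).map (fun i => (i, ends.getD i 0))
  let candidates := spans.filterMap (fun p =>
      let c := PySem.List.slice t (some (p.1 : Int)) (some ((p.2 : Int) + 1))
      if PySem.Chars.isIn "\"question\"".toList c || PySem.Chars.isIn "\"answer\"".toList c
      then some c else none)
  if candidates ≠ [] then
    String.ofList ((PySem.List.sorted candidates (fun c => (c.length : Int)) true).headD [])
  else
    let allc := spans.filterMap (fun p =>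
        if 100 < p.2 - p.1 + 1
        then some (PySem.List.slice t (some (p.1 : Int)) (some ((p.2 : Int) + 1))) else none)
    if allc ≠ [] then
      String.ofList ((PySem.List.sorted allc (fun c => (c.length : Int)) true).headD [])
    else
      let start := PySem.Chars.find t ['{']
      let en := PySem.Chars.rfind t ['}']
      if start ≠ -1 ∧ en ≠ -1 ∧ en > start then
        String.ofList (PySem.List.slice t (some start) (some (en + 1)))
      else String.ofList t

def extract_json_from_thinking_alt (text : String) : String :=
  match bPre1 text.toList with
  | some s => s
  | none =>
    match bPre2 text.toList with
    | some s => s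
    | none => bMain text.toList

-- ===== PRECONDITION & SPEC =====
def Spec_extract_json_from_thinking (text : String) (out : String) : Prop := out = extract_json_from_thinking_alt text
instance (text : String) (out : String) : Decidable (Spec_extract_json_from_thinking text out) := by unfold Spec_extract_json_from_thinking; infer_instance

-- ===== CLAIM (what is proved, stated in full; the proofs are below) =====
def Claim_equal_extract_json_from_thinking : Prop := ∀ (text : String), Dom_extract_json_from_thinking text → Spec_extract_json_from_thinking text (extract_json_from_thinking text)

-- ===== LEMMAS AND PROOFS =====

-- the spec-side matching end for a '{' at absolute index j
def endSpec (t : List Char) (j : Nat) : Option Nat :=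
  (aScan (t.drop j) 0 false false).map (fun m => j + m)

theorem aScan_lt : ∀ {cs : List Char} {d : Int} {s e : Bool} {m : Nat},
    aScan cs d s e = some m → m < cs.length := by
  intro cs
  induction cs with
  | nil => intro d s e m h; simp [aScan] at h
  | cons c rest ih =>
    intro d s e m h
    simp only [aScan] at h
    split_ifs at h <;>
      first
      | (simp only [Option.map_eq_some_iff] at h
         obtain ⟨m', hm', rfl⟩ := h
         have := ih hm'; simp; omega)
      | (simp_all; omega)

-- composition: a scan at depth d+c is the scan at depth c followed by a scan at depth d
theorem aScan_shift : ∀ (cs : List Char) (s e : Bool) (d c : Int), 0 < d → 0 < c →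
    aScan cs (d + c) s e
      = (aScan cs c s e).bind (fun m => (aScan (cs.drop (m + 1)) d false false).map (· + (m + 1))) := by
  intro cs
  induction cs with
  | nil => intro s e d c hd hc; simp [aScan]
  | cons ch rest ih =>
    intro s e d c hd hc
    simp only [aScan]
    split_ifs with h1 h2 h3 h4 h5 h6 h7 h8 h8
    · rw [ih s false d c hd hc]; cases aScan rest c s false <;> simp
    · rw [ih s true d c hd hc]; cases aScan rest c s true <;> simp
    · rw [ih (!s) e d c hd hc]; cases aScan rest c (!s) e <;> simp
    · rw [ih s e d c hd hc]; cases aScan rest c s e <;> simp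
    · have hh : d + c + 1 = d + (c + 1) := by ring
      rw [hh, ih s e d (c+1) hd (by omega)]
      cases aScan rest (c+1) s e <;> simp
    · omega
    · omega
    · -- c = 1: inner closes at this '}', outer continues at depth d
      have he : e = false := by simpa using h1
      have hs : s = false := by simpa using h4
      have hh : d + c - 1 = d := by omega
      rw [he, hs, hh]
      simp
    · have hh : d + c - 1 = d + (c - 1) := by ring
      rw [hh, ih s e d (c-1) hd (by omega)]
      cases aScan rest (c-1) s e <;> simp
    · rw [ih s e d c hd hc]; cases aScan rest c s e <;> simp

theorem aScan_esc (ch : Char) (rest : List Char) (depth : Int) (instr : Bool) :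
    aScan (ch :: rest) depth instr true = (aScan rest depth instr false).map (· + 1) := by
  simp [aScan]

theorem aScan_bs (rest : List Char) (depth : Int) :
    aScan ('\\' :: rest) depth true false = (aScan rest depth true true).map (· + 1) := by
  simp [aScan]

theorem aScan_quote (rest : List Char) (depth : Int) (instr : Bool) :
    aScan ('"' :: rest) depth instr false = (aScan rest depth (!instr) false).map (· + 1) := by
  cases instr <;> simp [aScan]

theorem aScan_instr (ch : Char) (rest : List Char) (depth : Int)
    (h1 : ch ≠ '\\') (h2 : ch ≠ '"') :
    aScan (ch :: rest) depth true false = (aScan rest depth true false).map (· + 1) := by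
  simp [aScan, h1, h2]

theorem aScan_open (rest : List Char) (depth : Int) :
    aScan ('{' :: rest) depth false false = (aScan rest (depth + 1) false false).map (· + 1) := by
  simp [aScan]

theorem aScan_close (rest : List Char) (depth : Int) :
    aScan ('}' :: rest) depth false false
      = if depth - 1 = 0 then some 0 else (aScan rest (depth - 1) false false).map (· + 1) := by
  simp [aScan]

theorem aScan_other (ch : Char) (rest : List Char) (depth : Int)
    (h2 : ch ≠ '"') (h3 : ch ≠ '{') (h4 : ch ≠ '}') :
    aScan (ch :: rest) depth false false = (aScan rest depth false false).map (· + 1) := by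
  simp [aScan, h2, h3, h4]

theorem bLoop_eq (t : List Char) (d : PySem.Dict Nat Nat) (lo : Nat)
    (hd : ∀ j' : Nat, lo ≤ j' → d.get? j' = if t.getD j' ' ' = '{' then endSpec t j' else none) :
    ∀ (fuel j : Nat) (instr esc : Bool), lo ≤ j → t.length - j < fuel →
      bLoop t t.length d fuel j instr esc = (aScan (t.drop j) 1 instr esc).map (j + ·) := by
  intro fuel
  induction fuel with
  | zero => intro j instr esc _ h; omega
  | succ fuel ih =>
    intro j instr esc hlo hfuel
    by_cases hj : j < t.length
    case neg =>
      have hdrop : t.drop j = [] := List.drop_eq_nil_of_le (by omega)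
      simp [bLoop, hdrop, aScan, hj]
    case pos =>
    have hdrop : t.drop j = t.getD j ' ' :: t.drop (j + 1) := by
      rw [List.getD_eq_getElem t ' ' hj]; exact List.drop_eq_getElem_cons hj
    cases esc with
    | true =>
      simp only [bLoop, if_pos hj]
      rw [hdrop, aScan_esc, ih (j+1) instr false (by omega) (by omega)]
      cases aScan (t.drop (j+1)) 1 instr false <;> simp; omega
    | false =>
    cases instr with
    | true =>
      by_cases hbs : t.getD j ' ' = '\\'
      · simp only [bLoop, if_pos hj]
        rw [if_neg (by simp), if_pos ⟨hbs, trivial⟩, hdrop, hbs, aScan_bs,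
            ih (j+1) true true (by omega) (by omega)]
        cases aScan (t.drop (j+1)) 1 true true <;> simp; omega
      · by_cases hq : t.getD j ' ' = '"'
        · simp only [bLoop, if_pos hj]
          rw [if_neg (by simp), if_neg (by simpa using hbs), if_pos hq, hdrop, hq, aScan_quote,
              ih (j+1) (!true) false (by omega) (by omega)]
          cases aScan (t.drop (j+1)) 1 (!true) false <;> simp; omega
        · simp only [bLoop, if_pos hj]
          rw [if_neg (by simp), if_neg (by simpa using hbs), if_neg hq, if_pos trivial, hdrop,
              aScan_instr _ _ _ hbs hq, ih (j+1) true false (by omega) (by omega)]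
          cases aScan (t.drop (j+1)) 1 true false <;> simp; omega
    | false =>
      by_cases hq : t.getD j ' ' = '"'
      · simp only [bLoop, if_pos hj]
        rw [if_neg (by simp), if_neg (by simp), if_pos hq, hdrop, hq, aScan_quote,
            ih (j+1) (!false) false (by omega) (by omega)]
        cases aScan (t.drop (j+1)) 1 (!false) false <;> simp; omega
      · by_cases hop : t.getD j ' ' = '{'
        · -- '{' : memo lookup replaces A's recursive descent (aScan_shift)
          simp only [bLoop, if_pos hj]
          rw [if_neg (by simp), if_neg (by simp), if_neg hq, if_neg (by simp), if_pos hop,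
              hd j hlo, if_pos hop]
          have hsh := aScan_shift (t.drop (j+1)) false false 1 1 (by omega) (by omega)
          norm_num at hsh
          have hspec : endSpec t j
              = (aScan (t.drop (j+1)) 1 false false).map (fun m => j + (m + 1)) := by
            unfold endSpec
            rw [hdrop, hop, aScan_open]
            norm_num
            cases aScan (t.drop (j+1)) 1 false false <;> simp
          rw [hdrop, hop, aScan_open]
          norm_num
          rw [hsh]
          cases hsc : aScan (t.drop (j+1)) 1 false false with
          | none => rw [hspec, hsc]; simp
          | some m0 =>
            rw [hspec, hsc]
            simp only [Option.map_some, Option.bind_some]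
            rw [ih (j + (m0 + 1) + 1) false false (by omega) (by omega)]
            simp only [show j + 1 + (m0 + 1) = j + (m0 + 1) + 1 from by omega]
            cases aScan (t.drop (j + (m0+1) + 1)) 1 false false <;> simp; omega
        · by_cases hcl : t.getD j ' ' = '}'
          · simp only [bLoop, if_pos hj]
            rw [if_neg (by simp), if_neg (by simp), if_neg hq, if_neg (by simp), if_neg hop,
                if_pos hcl, hdrop, hcl, aScan_close]
            norm_num
          · simp only [bLoop, if_pos hj]
            rw [if_neg (by simp), if_neg (by simp), if_neg hq, if_neg (by simp), if_neg hop,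
                if_neg hcl, hdrop, aScan_other _ _ _ hq hop hcl,
                ih (j+1) false false (by omega) (by omega)]
            cases aScan (t.drop (j+1)) 1 false false <;> simp; omega

theorem endSpec_open (t : List Char) (i : Nat) (hi : i < t.length) (hop : t.getD i ' ' = '{') :
    endSpec t i = (aScan (t.drop (i + 1)) 1 false false).map (fun m => i + (m + 1)) := by
  have hdrop : t.drop i = t.getD i ' ' :: t.drop (i + 1) := by
    rw [List.getD_eq_getElem t ' ' hi]; exact List.drop_eq_getElem_cons hi
  unfold endSpec
  rw [hdrop, hop, aScan_open]
  norm_num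
  cases aScan (t.drop (i + 1)) 1 false false <;> simp

theorem bBuild_inv (t : List Char) : ∀ (i : Nat) (d : PySem.Dict Nat Nat), i ≤ t.length →
    (∀ j : Nat, d.get? j = if (i ≤ j ∧ t.getD j ' ' = '{') then endSpec t j else none) →
    (∀ j : Nat, (bBuild t t.length i d).get? j = if t.getD j ' ' = '{' then endSpec t j else none) := by
  intro i
  induction i with
  | zero =>
    intro d _ hd j
    have := hd j
    simpa using this
  | succ i ihi =>
    intro d hle hd j
    simp only [bBuild]
    apply ihi _ (by omega) ?_ j
    intro j'
    by_cases hop : t.getD i ' ' = '{'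
    · rw [if_pos hop]
      have hi : i < t.length := by
        by_contra hcon
        rw [List.getD_eq_default t ' ' (by omega)] at hop
        exact absurd hop (by decide)
      have hloop := bLoop_eq t d (i + 1)
        (fun j' hj' => by rw [hd j']; simp [hj'])
        (t.length + 1) (i + 1) false false (le_refl _) (by omega)
      rw [hloop]
      have hspec := endSpec_open t i hi hop
      cases hsc : aScan (t.drop (i + 1)) 1 false false with
      | none =>
        simp only [Option.map_none]
        rw [hd j']
        by_cases hji : j' = i
        · subst hji
          rw [if_neg (by omega), if_pos ⟨le_refl _, hop⟩, hspec, hsc]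
          rfl
        · have hc : (i + 1 ≤ j' ∧ t.getD j' ' ' = '{') ↔ (i ≤ j' ∧ t.getD j' ' ' = '{') :=
            ⟨fun ⟨a, b⟩ => ⟨by omega, b⟩, fun ⟨a, b⟩ => ⟨by omega, b⟩⟩
          simp only [hc]
      | some m0 =>
        simp only [Option.map_some]
        by_cases hji : j' = i
        · subst hji
          rw [PySem.Dict.get?_insert_self, if_pos ⟨le_refl _, hop⟩, hspec, hsc]
          simp only [Option.map_some]
          congr 1
          omega
        · rw [PySem.Dict.get?_insert_of_ne _ _ hji, hd j']
          have hc : (i + 1 ≤ j' ∧ t.getD j' ' ' = '{') ↔ (i ≤ j' ∧ t.getD j' ' ' = '{') :=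
            ⟨fun ⟨a, b⟩ => ⟨by omega, b⟩, fun ⟨a, b⟩ => ⟨by omega, b⟩⟩
          simp only [hc]
    · rw [if_neg hop]
      rw [hd j']
      by_cases hji : j' = i
      · subst hji
        rw [if_neg (by omega), if_neg (by exact fun h => hop h.2)]
      · have hc : (i + 1 ≤ j' ∧ t.getD j' ' ' = '{') ↔ (i ≤ j' ∧ t.getD j' ' ' = '{') :=
          ⟨fun ⟨a, b⟩ => ⟨by omega, b⟩, fun ⟨a, b⟩ => ⟨by omega, b⟩⟩
        simp only [hc]

theorem bBuild_nodup (t : List Char) : ∀ (i : Nat) (d : PySem.Dict Nat Nat), d.keys.Nodup →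
    (bBuild t t.length i d).keys.Nodup := by
  intro i
  induction i with
  | zero => intro d h; exact h
  | succ i ihi =>
    intro d h
    simp only [bBuild]
    apply ihi
    split_ifs with hop
    · cases bLoop t t.length d (t.length + 1) (i + 1) false false with
      | none => exact h
      | some e => exact PySem.Dict.nodup_keys_insert _ _ _ h
    · exact h

theorem aCollect_eq (pred : List Char → Bool) (t : List Char) :
    aCollect pred t = (List.range t.length).filterMap (fun i =>
      (if t.getD i ' ' = '{' then aScan (t.drop i) 0 false false else none).bind (fun m =>
        let cand := (t.drop i).take (m + 1); if pred cand then some cand else none)) := by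
  induction t with
  | nil => simp [aCollect]
  | cons c rest ih =>
    simp only [aCollect, List.length_cons, List.range_succ_eq_map, List.filterMap_cons,
      List.filterMap_map]
    have htail : List.filterMap ((fun i =>
        (if (c :: rest).getD i ' ' = '{' then aScan ((c :: rest).drop i) 0 false false
         else none).bind (fun m =>
          let cand := ((c :: rest).drop i).take (m + 1); if pred cand then some cand else none))
        ∘ Nat.succ) (List.range rest.length)
        = aCollect pred rest := by
      rw [ih]
      apply List.filterMap_congr
      intro i _
      simp [Function.comp, List.drop_succ_cons]
    rw [htail]
    simp only [List.getD_cons_zero, List.drop_zero]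
    cases h0 : (if c = '{' then aScan (c :: rest) 0 false false else none) with
    | none => simp
    | some m =>
      by_cases hp : pred (c :: List.take m rest) <;> simp [hp]

theorem ends_inv (t : List Char) :
    ∀ j : Nat, (bBuild t t.length t.length PySem.Dict.empty).get? j
      = if t.getD j ' ' = '{' then endSpec t j else none := by
  apply bBuild_inv t t.length PySem.Dict.empty le_rfl
  intro j
  rw [PySem.Dict.get?_empty]
  split_ifs with h
  · exfalso
    rcases h with ⟨hle, hop⟩
    rw [List.getD_eq_default t ' ' hle] at hop
    exact absurd hop (by decide)
  · rfl

theorem ends_keys_sorted (t : List Char) :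
    PySem.List.sorted (bBuild t t.length t.length PySem.Dict.empty).keys (fun k => k)
      = (List.range t.length).filter
          (fun j => decide (t.getD j ' ' = '{') && (aScan (t.drop j) 0 false false).isSome) := by
  have hnd : (bBuild t t.length t.length PySem.Dict.empty).keys.Nodup :=
    bBuild_nodup t t.length _ PySem.Dict.nodup_keys_empty
  have hmem : ∀ a : Nat, a ∈ (bBuild t t.length t.length PySem.Dict.empty).keys
      ↔ (t.getD a ' ' = '{' ∧ (aScan (t.drop a) 0 false false).isSome = true) := by
    intro a
    have h1 : a ∈ (bBuild t t.length t.length PySem.Dict.empty).keys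
        ↔ ¬ ((bBuild t t.length t.length PySem.Dict.empty).get? a = none) := by
      rw [PySem.Dict.get?_eq_none_iff_not_mem_keys]
      exact (not_not).symm
    rw [h1, ends_inv t a]
    split_ifs with h
    · cases hsc : aScan (t.drop a) 0 false false with
      | none => simp [endSpec, hsc]
      | some m =>
        simp [endSpec, hsc]
        simpa using h
    · constructor
      · intro hx; exact absurd rfl hx
      · rintro ⟨h1, -⟩; exact absurd (by simpa using h1) h
  apply PySem.List.sorted_eq_of_perm_of_pairwise_lt
  · rw [List.perm_ext_iff_of_nodup (List.Nodup.filter _ List.nodup_range) hnd]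
    intro a
    rw [List.mem_filter, List.mem_range, hmem a, Bool.and_eq_true, decide_eq_true_eq]
    constructor
    · rintro ⟨_, h1, h2⟩; exact ⟨h1, h2⟩
    · rintro ⟨h1, h2⟩
      refine ⟨?_, h1, h2⟩
      by_contra hcon
      rw [List.getD_eq_default t ' ' (by omega)] at h1
      exact absurd h1 (by decide)
  · exact List.pairwise_lt_range.filter _

theorem spans_filterMap_eq (t : List Char) (pred : List Char → Bool)
    (F : Nat × Nat → Option (List Char))
    (hsome : ∀ i m : Nat, t.getD i ' ' = '{' → aScan (t.drop i) 0 false false = some m →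
        F (i, i + m)
          = if pred ((t.drop i).take (m + 1)) then some ((t.drop i).take (m + 1)) else none) :
    List.filterMap F
        (List.map (fun i => (i, (bBuild t t.length t.length PySem.Dict.empty).getD i 0))
          (PySem.List.sorted (bBuild t t.length t.length PySem.Dict.empty).keys (fun k => k)))
      = aCollect pred t := by
  rw [ends_keys_sorted, List.filterMap_map, aCollect_eq, List.filterMap_filter]
  apply List.filterMap_congr
  intro i _
  by_cases hop : t.getD i ' ' = '{'
  · cases hsc : aScan (t.drop i) 0 false false with
    | none => simp
    | some m =>
      have hgetD : (bBuild t t.length t.length PySem.Dict.empty).getD i 0 = i + m := by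
        rw [PySem.Dict.getD_eq_get?_getD, ends_inv t i, if_pos hop]
        unfold endSpec
        rw [hsc]
        rfl
      simp only [Function.comp, hgetD, hop, decide_true, Option.isSome_some,
        Bool.and_self, if_pos trivial, Option.bind_some]
      rw [hsome i m hop hsc]
  · have hop' : ¬ t[i]?.getD ' ' = '{' := by simpa using hop
    simp [hop']

theorem main_eq (t : List Char) : aMain t = bMain t := by
  simp only [aMain, bMain]
  have hsl : ∀ i m : Nat, PySem.List.slice t (some (i : Int)) (some ((↑(i + m) : Int) + 1))
      = (t.drop i).take (m + 1) := by
    intro i m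
    have h1 : ((↑(i + m) : Int) + 1) = ((i + m + 1 : Nat) : Int) := by push_cast; ring
    rw [h1, PySem.List.slice_natCast]
    congr 1
    omega
  have hcand := spans_filterMap_eq t
    (fun c => PySem.Chars.isIn "\"question\"".toList c || PySem.Chars.isIn "\"answer\"".toList c)
    (fun x => if (PySem.Chars.isIn "\"question\"".toList (PySem.List.slice t (some ↑x.1) (some (↑x.2 + 1))) ||
                  PySem.Chars.isIn "\"answer\"".toList (PySem.List.slice t (some ↑x.1) (some (↑x.2 + 1)))) = true then
                some (PySem.List.slice t (some ↑x.1) (some (↑x.2 + 1)))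
              else none)
    (by intro i m hop hsc
        simp only [hsl i m])
  have hall := spans_filterMap_eq t (fun c => decide (100 < c.length))
    (fun x => if 100 < x.2 - x.1 + 1 then some (PySem.List.slice t (some ↑x.1) (some (↑x.2 + 1))) else none)
    (by intro i m hop hsc
        have hm : m < (t.drop i).length := aScan_lt hsc
        have hlen : ((t.drop i).take (m + 1)).length = m + 1 := by
          rw [List.length_take]; omega
        simp only [hsl i m, hlen, decide_eq_true_eq]
        have h2 : (i + m) - i + 1 = m + 1 := by omega
        rw [h2])
  rw [hcand, hall]

-- ===== VERDICT (by name: the statement is the Claim_ definition above) =====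
theorem extract_json_from_thinking_spec : Claim_equal_extract_json_from_thinking := by
  intro text _
  show extract_json_from_thinking text = extract_json_from_thinking_alt text
  unfold extract_json_from_thinking extract_json_from_thinking_alt
  rw [show bPre1 = aPre1 from rfl, show bPre2 = aPre2 from rfl]
  cases aPre1 text.toList with
  | some s => rfl
  | none =>
    cases aPre2 text.toList with
    | some s => rfl
    | none => exact main_eq text.toList
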